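-- pv_equiv track=rewrite | github.com/bandidotkom/Studies | mit_intro/ps3.py | subStringMatchOneSub
-- ===== SOURCE A (Python) =====
-- def subStringMatchExact(key, target):
--     res = ()
--     n = len(key)
--     for i in range (len(target)):
--         x = target.find(key, i, i+n)
--         if (x>=0):
--             res = res + (i,)
--     return res
--
-- def constrainedMatchPair(firstMatch,secondMatch,length):
--     res = ()
--     for i in firstMatch:
--         if (i+length+1 in secondMatch):
--             res = res + (i,)
--     return res
--
-- def subStringMatchOneSub(key,target):
--     """search for all locations of key in target, with one substitution"""
--     allAnswers = ()
--     for miss in range(0,len(key)):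
--         # miss picks location for missing element
--         # key1 and key2 are substrings to match
--         key1 = key[:miss]
--         key2 = key[miss+1:]
--         print ('breaking key',key,'into',key1,key2)
--         # match1 and match2 are tuples of locations of start of matches
--         # for each substring in target
--         match1 = subStringMatchExact(key1,target)
--         match2 = subStringMatchExact(key2,target)
--         # when we get here, we have two tuples of start points
--         # need to filter pairs to decide which are correct
--         filtered = constrainedMatchPair(match1,match2,len(key1))
--         allAnswers = allAnswers + filtered
--         print ('match1',match1)
--         print ('match2',match2)
--         print ('possible matches for',key1,key2,'start at',filtered)
--     return allAnswers
-- ===== SOURCE B (Python) =====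
-- def _prefixLen(key, target, i):
--     """number of leading characters of key that match target at position i"""
--     n = 0
--     while n < len(key) and i + n < len(target) and key[n] == target[i + n]:
--         n += 1
--     return n
--
-- def subStringMatchOneSub(key, target):
--     """search for all locations of key in target, with one substitution"""
--     k, t = len(key), len(target)
--     pref = [_prefixLen(key, target, i) for i in range(t)]
--     answers = []
--     for m in range(k):
--         tail = key[m + 1:]
--         # start positions in target where the tail piece occurs
--         tail_at = {j for j in range(t) if target[j:j + len(tail)] == tail}
--         answers += [i for i in range(t) if pref[i] >= m and i + m + 1 in tail_at]
--     return tuple(answers)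
-- ===== Notes on version B (the rewrite author's own statement) =====
-- stated objective: faster
-- what changed: B precomputes one longest-matching-prefix count per target position (so the per-slot head matching disappears) and, per slot, builds a set of tail occurrence positions by direct slice comparison, replacing A's per-slot str.find scans over sliced windows and its quadratic tuple-membership pair filter with O(1) set lookups.
import Mathlib
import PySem

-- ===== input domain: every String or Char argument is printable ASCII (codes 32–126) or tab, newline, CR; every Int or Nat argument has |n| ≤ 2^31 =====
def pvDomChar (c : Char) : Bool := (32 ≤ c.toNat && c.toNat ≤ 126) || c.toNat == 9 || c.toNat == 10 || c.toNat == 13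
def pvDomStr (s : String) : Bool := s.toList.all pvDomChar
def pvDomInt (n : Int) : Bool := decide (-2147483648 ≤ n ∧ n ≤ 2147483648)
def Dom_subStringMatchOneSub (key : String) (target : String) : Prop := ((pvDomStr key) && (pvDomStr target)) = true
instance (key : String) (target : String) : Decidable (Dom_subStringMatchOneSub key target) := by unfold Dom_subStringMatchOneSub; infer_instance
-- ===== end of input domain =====

-- B precomputes a longest-matching-prefix array for the head pieces and uses a set of
-- tail occurrence positions, replacing A's per-slot str.find scans and quadratic
-- tuple-membership pair filter; objective: faster. Equivalence is about return
-- values only (A also prints progress lines to stdout, B does not).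

-- ===== PORT A =====
def subStringMatchExactA (key : String) (target : String) : List Int :=
  let n : Int := PySem.Str.len key
  (PySem.List.pyRange 0 (PySem.Str.len target) 1).foldl
    (fun res i =>
      let x := PySem.Str.findFrom target key i (some (i + n))
      if 0 ≤ x then res ++ [i] else res) []

def constrainedMatchPairA (firstMatch : List Int) (secondMatch : List Int) (length : Int) : List Int :=
  firstMatch.foldl
    (fun res i => if i + length + 1 ∈ secondMatch then res ++ [i] else res) []

def subStringMatchOneSub (key : String) (target : String) : List Int :=
  (PySem.List.pyRange 0 (PySem.Str.len key) 1).foldl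
    (fun allAnswers miss =>
      let key1 := PySem.Str.slice key none (some miss)
      let key2 := PySem.Str.slice key (some (miss + 1)) none
      let match1 := subStringMatchExactA key1 target
      let match2 := subStringMatchExactA key2 target
      let filtered := constrainedMatchPairA match1 match2 (PySem.Str.len key1)
      allAnswers ++ filtered) []

-- ===== PORT B =====
-- the while loop of _prefixLen, entered with counter n
def pvPLoop (key target : String) (i : Int) (n : Int) : Int :=
  if h : n < PySem.Str.len key ∧ i + n < PySem.Str.len target ∧
      PySem.Str.pyGet? key n = PySem.Str.pyGet? target (i + n) then
    pvPLoop key target i (n + 1)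
  else n
termination_by (PySem.Str.len key - n).toNat
decreasing_by
  rw [PySem.Str.len_eq] at h ⊢
  omega

-- number of leading characters of key that match target at position i
def pvPrefixLen (key target : String) (i : Int) : Int :=
  pvPLoop key target i 0

def subStringMatchOneSub_alt (key : String) (target : String) : List Int :=
  let k : Int := PySem.Str.len key
  let t : Int := PySem.Str.len target
  let pref : List Int := (PySem.List.pyRange 0 t 1).map (fun i => pvPrefixLen key target i)
  (PySem.List.pyRange 0 k 1).foldl
    (fun answers m =>
      let tail := PySem.Str.slice key (some (m + 1)) none
      let tailAt : PySem.Set Int :=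
        PySem.Set.ofList ((PySem.List.pyRange 0 t 1).filter
          (fun j => PySem.Str.slice target (some j) (some (j + PySem.Str.len tail)) == tail))
      answers ++ (PySem.List.pyRange 0 t 1).filter
        (fun i => decide (m ≤ PySem.List.pyGetD pref i 0) && PySem.Set.contains tailAt (i + m + 1))) []

-- ===== PRECONDITION & SPEC =====
def Spec_subStringMatchOneSub (key : String) (target : String) (out : List Int) : Prop :=
  out = subStringMatchOneSub_alt key target
instance (key : String) (target : String) (out : List Int) : Decidable (Spec_subStringMatchOneSub key target out) := by
  unfold Spec_subStringMatchOneSub; infer_instance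

-- ===== CLAIM (what is proved, stated in full; the proofs are below) =====
def Claim_equal_subStringMatchOneSub : Prop := ∀ (key : String) (target : String), Dom_subStringMatchOneSub key target → Spec_subStringMatchOneSub key target (subStringMatchOneSub key target)

-- ===== LEMMAS AND PROOFS =====

theorem pvInfixTake (K D : List Char) : K <:+: D.take K.length ↔ K <+: D := by
  constructor
  · intro h
    have hlen : (D.take K.length).length ≤ K.length := by simp
    have heq : K = D.take K.length :=
      h.sublist.eq_of_length (le_antisymm h.length_le hlen)
    rw [List.prefix_iff_eq_take]
    have : K.length ≤ D.length := by
      have := congrArg List.length heq; simp at this; omega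
    rw [heq]; simp [List.length_take, Nat.min_eq_left this]
  · intro h
    have : K = (D.take K.length) := by
      rw [List.prefix_iff_eq_take] at h; exact h
    rw [← this]

theorem pvFindWindow (T K : List Char) (i : Int) (h0 : 0 ≤ i) (h1 : i < (T.length : Int)) :
    (0 ≤ PySem.Chars.findFrom T K i (some (i + (K.length : Int)))) ↔ K <+: T.drop i.toNat := by
  simp only [PySem.Chars.findFrom]
  rw [if_neg (by omega : ¬ i < 0)]
  by_cases hcase : (T.length : Int) < i + (K.length : Int)
  · rw [if_pos hcase, if_neg (by omega : ¬ (T.length : Int) < i)]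
    have hw : (T.take (T.length : Int).toNat).drop i.toNat = T.drop i.toNat := by
      simp
    rw [hw]
    have hlen : (T.drop i.toNat).length < K.length := by
      simp [List.length_drop]; omega
    have hni : ¬ K <+: T.drop i.toNat := fun h => by
      have := h.length_le; omega
    simp only [iff_false_intro hni, iff_false]
    intro hge
    split_ifs at hge with hr
    · omega
    · have := (PySem.Chars.find_ne_neg_one_iff _ _).mp hr
      have := this.length_le; omega
  · rw [if_neg hcase, if_neg (by omega : ¬ i + (K.length : Int) < 0),
        if_neg (by omega : ¬ i + (K.length : Int) < i)]
    have hw : (T.take (i + (K.length : Int)).toNat).drop i.toNat = (T.drop i.toNat).take K.length := by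
      rw [List.drop_take]
      congr 1
      omega
    rw [hw]
    rw [← pvInfixTake K (T.drop i.toNat)]
    constructor
    · intro hge
      split_ifs at hge with hr
      · omega
      · exact (PySem.Chars.find_ne_neg_one_iff _ _).mp hr
    · intro hinf
      have hr := (PySem.Chars.find_ne_neg_one_iff ((T.drop i.toNat).take K.length) K).mpr hinf
      rw [if_neg hr]
      have := PySem.Chars.neg_one_le_find ((T.drop i.toNat).take K.length) K
      omega

theorem pvPrefixIff (X Y : List Char) : X <+: Y ↔ ∀ j, j < X.length → X[j]? = Y[j]? := by
  rw [List.prefix_iff_getElem?]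
  constructor
  · intro h j hj
    rw [h j hj, List.getElem?_eq_getElem hj]
  · intro h j hj
    rw [← h j hj, List.getElem?_eq_getElem hj]

def pvE (X T : List Char) : List Int :=
  (PySem.List.pyRange 0 (T.length : Int) 1).filter (fun i => decide (X <+: T.drop i.toNat))

def pvGA (key target : String) (miss : Int) : List Int :=
  (pvE (key.toList.take miss.toNat) target.toList).filter
    (fun i => decide (i + miss + 1 ∈ pvE (key.toList.drop (miss.toNat + 1)) target.toList))

theorem pvPairA_eq (m1 m2 : List Int) (len : Int) :
    constrainedMatchPairA m1 m2 len = m1.filter (fun i => decide (i + len + 1 ∈ m2)) := by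
  unfold constrainedMatchPairA
  rw [PySem.List.foldl_append_ite_eq_filter (fun i => i + len + 1 ∈ m2) m1 []]
  simp

theorem pvExactA_eq (key target : String) :
    subStringMatchExactA key target = pvE key.toList target.toList := by
  unfold pvE
  show (PySem.List.pyRange 0 (PySem.Str.len target) 1).foldl
      (fun res i =>
        if 0 ≤ PySem.Str.findFrom target key i (some (i + PySem.Str.len key)) then res ++ [i] else res) [] = _
  rw [PySem.List.foldl_append_ite_eq_filter
    (fun i => 0 ≤ PySem.Str.findFrom target key i (some (i + PySem.Str.len key)))
    (PySem.List.pyRange 0 (PySem.Str.len target) 1) []]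
  rw [PySem.Str.len_eq]
  refine (List.nil_append _).trans (List.filter_congr ?_)
  intro i hi
  rw [PySem.List.mem_pyRange_one] at hi
  apply decide_eq_decide.mpr
  rw [PySem.Str.findFrom_eq]
  rw [PySem.Str.len_eq] at hi
  exact pvFindWindow target.toList key.toList i hi.1 hi.2

theorem pvA_eq (key target : String) :
    subStringMatchOneSub key target =
      (PySem.List.pyRange 0 (key.toList.length : Int) 1).flatMap (pvGA key target) := by
  show (PySem.List.pyRange 0 (PySem.Str.len key) 1).foldl
      (fun allAnswers miss =>
        allAnswers ++ constrainedMatchPairA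
          (subStringMatchExactA (PySem.Str.slice key none (some miss)) target)
          (subStringMatchExactA (PySem.Str.slice key (some (miss + 1)) none) target)
          (PySem.Str.len (PySem.Str.slice key none (some miss)))) [] = _
  rw [PySem.List.foldl_append_eq_flatMap _ (PySem.List.pyRange 0 (PySem.Str.len key) 1) []]
  rw [PySem.Str.len_eq, List.nil_append, List.flatMap_def, List.flatMap_def]
  congr 1
  apply List.map_congr_left
  intro miss hmem
  rw [PySem.List.mem_pyRange_one] at hmem
  obtain ⟨h0, hk⟩ := hmem
  have hm : miss.toNat ≤ key.toList.length := by omega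
  have hkey1 : (PySem.Str.slice key none (some miss)).toList = key.toList.take miss.toNat := by
    rw [PySem.Str.toList_slice, PySem.Chars.slice_eq_listSlice, PySem.List.slice_to _ h0]
  have hkey2 : (PySem.Str.slice key (some (miss + 1)) none).toList = key.toList.drop (miss.toNat + 1) := by
    rw [PySem.Str.toList_slice, PySem.Chars.slice_eq_listSlice,
      PySem.List.slice_from _ (by omega : (0:Int) ≤ miss + 1)]
    congr 1
    omega
  have hlen1 : PySem.Str.len (PySem.Str.slice key none (some miss)) = miss := by
    rw [PySem.Str.len_eq, hkey1, List.length_take]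
    omega
  rw [pvPairA_eq, pvExactA_eq, pvExactA_eq, hkey1, hkey2, hlen1]
  rfl

-- ---- characterising B's prefix-length loop ----

theorem pvPLoop_ge_self (key target : String) (i : Int) : ∀ n : Int, n ≤ pvPLoop key target i n := by
  intro n
  induction n using pvPLoop.induct key target i with
  | case1 n h ih =>
    rw [pvPLoop, dif_pos h]
    omega
  | case2 n h =>
    rw [pvPLoop, dif_neg h]

theorem pvPLoop_matched (key target : String) (i : Int) :
    ∀ n j : Int, n ≤ j → j < pvPLoop key target i n →
      (j < PySem.Str.len key ∧ i + j < PySem.Str.len target ∧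
        PySem.Str.pyGet? key j = PySem.Str.pyGet? target (i + j)) := by
  intro n
  induction n using pvPLoop.induct key target i with
  | case1 n h ih =>
    intro j hnj hjr
    rw [pvPLoop, dif_pos h] at hjr
    rcases eq_or_lt_of_le hnj with rfl | hlt
    · exact h
    · exact ih j (by omega) hjr
  | case2 n h =>
    intro j hnj hjr
    rw [pvPLoop, dif_neg h] at hjr
    omega

theorem pvPLoop_ge_of_matched (key target : String) (i m : Int)
    (hall : ∀ j : Int, 0 ≤ j → j < m →
      (j < PySem.Str.len key ∧ i + j < PySem.Str.len target ∧
        PySem.Str.pyGet? key j = PySem.Str.pyGet? target (i + j))) :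
    ∀ n : Int, 0 ≤ n → n ≤ m → n ≤ pvPLoop key target i n → m ≤ pvPLoop key target i n := by
  intro n
  induction n using pvPLoop.induct key target i with
  | case1 n h ih =>
    intro h0 hnm _
    rw [pvPLoop, dif_pos h]
    rcases eq_or_lt_of_le hnm with rfl | hlt
    · calc n ≤ n + 1 := by omega
        _ ≤ pvPLoop key target i (n + 1) := pvPLoop_ge_self key target i (n + 1)
    · exact ih (by omega) (by omega) (pvPLoop_ge_self key target i (n + 1))
  | case2 n h =>
    intro h0 hnm _
    rw [pvPLoop, dif_neg h]
    rcases eq_or_lt_of_le hnm with rfl | hlt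
    · omega
    · exact absurd (hall n h0 hlt) h

-- m ≤ pref[i]  ⇔  key[:m] occurs at i   (for 0 ≤ m ≤ len key, 0 ≤ i)
theorem pvPrefixLen_ge_iff (key target : String) (i m : Int) (h0i : 0 ≤ i) (h0m : 0 ≤ m)
    (hmk : m ≤ (key.toList.length : Int)) :
    (m ≤ pvPrefixLen key target i) ↔
      key.toList.take m.toNat <+: target.toList.drop i.toNat := by
  unfold pvPrefixLen
  constructor
  · intro hge
    rw [pvPrefixIff]
    intro j hj
    rw [List.length_take] at hj
    have hjm : j < m.toNat := by omega
    have := pvPLoop_matched key target i 0 (j : Int) (by omega) (by omega)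
    rw [PySem.Str.len_eq, PySem.Str.len_eq] at this
    obtain ⟨hjk, hjt, hchar⟩ := this
    rw [PySem.Str.pyGet?_natCast] at hchar
    have hc2 : PySem.Str.pyGet? target (i + (j : Int)) = target.toList[i.toNat + j]? := by
      have := PySem.Str.pyGet?_natCast target (i.toNat + j)
      rw [show ((i.toNat + j : Nat) : Int) = i + (j : Int) by omega] at this
      exact this
    rw [hc2] at hchar
    rw [List.getElem?_take_of_lt hjm, List.getElem?_drop]
    exact hchar
  · intro hpre
    apply pvPLoop_ge_of_matched key target i m _ 0 le_rfl h0m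
        (pvPLoop_ge_self key target i 0)
    intro j h0j hjm
    have hlen := hpre.length_le
    rw [List.length_take, List.length_drop] at hlen
    refine ⟨by rw [PySem.Str.len_eq]; omega, by rw [PySem.Str.len_eq]; omega, ?_⟩
    rw [pvPrefixIff] at hpre
    have := hpre j.toNat (by rw [List.length_take]; omega)
    rw [List.getElem?_take_of_lt (by omega : j.toNat < m.toNat), List.getElem?_drop] at this
    have e1 : PySem.Str.pyGet? key j = key.toList[j.toNat]? := by
      have := PySem.Str.pyGet?_natCast key j.toNat
      rwa [Int.toNat_of_nonneg h0j] at this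
    have e2 : PySem.Str.pyGet? target (i + j) = target.toList[i.toNat + j.toNat]? := by
      have := PySem.Str.pyGet?_natCast target (i.toNat + j.toNat)
      rw [show ((i.toNat + j.toNat : Nat) : Int) = i + j by omega] at this
      exact this
    rw [e1, e2, this]

-- ---- the tail-occurrence slice test ----

theorem pvSliceTest (target : String) (tl : List Char) (j : Int) :
    ((target.toList.drop j.toNat).take tl.length = tl) ↔ tl <+: target.toList.drop j.toNat := by
  constructor
  · intro h
    rw [List.prefix_iff_eq_take, h]
  · intro h
    exact (List.prefix_iff_eq_take.mp h).symm

theorem pvMaster (key target : String) :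
    subStringMatchOneSub key target = subStringMatchOneSub_alt key target := by
  rw [pvA_eq]
  show _ = (PySem.List.pyRange 0 (PySem.Str.len key) 1).foldl
    (fun answers m => answers ++ _) []
  rw [PySem.List.foldl_append_eq_flatMap _ (PySem.List.pyRange 0 (PySem.Str.len key) 1) []]
  rw [PySem.Str.len_eq, List.nil_append, List.flatMap_def, List.flatMap_def]
  congr 1
  apply List.map_congr_left
  intro m hmem
  rw [PySem.List.mem_pyRange_one] at hmem
  obtain ⟨h0m, hmk⟩ := hmem
  -- the tail piece
  have htail : (PySem.Str.slice key (some (m + 1)) none).toList = key.toList.drop (m.toNat + 1) := by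
    rw [PySem.Str.toList_slice, PySem.Chars.slice_eq_listSlice,
      PySem.List.slice_from _ (by omega : (0:Int) ≤ m + 1)]
    congr 1
    omega
  set tl : List Char := key.toList.drop (m.toNat + 1) with htl
  -- the tail-occurrence list equals pvE tl target
  have htailAt : (PySem.List.pyRange 0 ((target.toList.length : Int)) 1).filter
      (fun j => PySem.Str.slice target (some j)
        (some (j + PySem.Str.len (PySem.Str.slice key (some (m + 1)) none))) ==
          PySem.Str.slice key (some (m + 1)) none) = pvE tl target.toList := by
    unfold pvE
    apply List.filter_congr
    intro j hj
    rw [PySem.List.mem_pyRange_one] at hj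
    obtain ⟨h0j, hjt⟩ := hj
    have hslice : (PySem.Str.slice target (some j)
        (some (j + ((PySem.Str.slice key (some (m + 1)) none).toList.length : Int)))).toList =
          (target.toList.drop j.toNat).take tl.length := by
      rw [htail, PySem.Str.toList_slice, PySem.Chars.slice_eq_listSlice]
      rw [PySem.List.slice_toNat _ h0j (by omega : (0:Int) ≤ j + (tl.length : Int))]
      congr 1
      omega
    rw [Bool.eq_iff_iff, beq_iff_eq, decide_eq_true_iff, PySem.Str.len_eq,
      ← String.toList_inj, hslice, htail]
    exact pvSliceTest target tl j
  rw [htailAt]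
  -- unfold pvGA into a single filter over range(t)
  unfold pvGA pvE
  rw [List.filter_filter]
  apply List.filter_congr
  intro i hi
  rw [PySem.List.mem_pyRange_one] at hi
  obtain ⟨h0i, hit⟩ := hi
  rw [PySem.List.pyGetD_map_pyRange_of_nonneg _ _ _ _ h0i hit]
  rw [Bool.eq_iff_iff, Bool.and_eq_true, Bool.and_eq_true]
  simp only [decide_eq_true_iff]
  rw [pvPrefixLen_ge_iff key target i m h0i h0m (by omega)]
  constructor
  · rintro ⟨hmem, hhead⟩
    refine ⟨hhead, ?_⟩
    rw [PySem.Set.contains_iff, PySem.Set.mem_ofList]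
    exact hmem
  · rintro ⟨hhead, hmem⟩
    rw [PySem.Set.contains_iff, PySem.Set.mem_ofList] at hmem
    exact ⟨hmem, hhead⟩

-- ===== VERDICT (by name: the statement is the Claim_ definition above) =====
theorem subStringMatchOneSub_spec : Claim_equal_subStringMatchOneSub := by
  intro key target _
  exact pvMaster key target
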